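-- pv_equiv track=rewrite | github.com/juandavidjd/extracii | product_segmenter.py | segment_products
-- ===== SOURCE A (Python) =====
-- def segment_products(blocks):
--     """
--     Convierte bloques del layout en filas lógicas tipo tabla.
--     """
--
--     # Ordenar bloques por posición vertical
--     blocks = sorted(blocks, key=lambda b: b[1])
--
--     rows = []
--     current_row = []
--
--     prev_y = None
--     threshold = 40  # separa productos por altura
--
--     for b in blocks:
--         x, y, w, h = b
--
--         if prev_y is None:
--             current_row.append(b)
--         else:
--             if abs(y - prev_y) < threshold:
--                 current_row.append(b)
--             else:
--                 rows.append(current_row)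
--                 current_row = [b]
--
--         prev_y = y
--
--     if current_row:
--         rows.append(current_row)
--
--     return rows
-- ===== SOURCE B (Python) =====
-- def segment_products(blocks):
--     """
--     Convierte bloques del layout en filas lógicas tipo tabla.
--     Two-pass decomposition: locate row boundaries, then partition by slicing.
--     """
--     s = sorted(blocks, key=lambda b: b[1])
--     if not s:
--         return []
--     threshold = 40
--     n = len(s)
--     breaks = [i for i in range(1, n) if abs(s[i][1] - s[i - 1][1]) >= threshold]
--     bounds = [0] + breaks + [n]
--     return [s[a:b] for a, b in zip(bounds, bounds[1:])]
-- ===== Notes on version B (the rewrite author's own statement) =====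
-- stated objective: alternative
-- what changed: Replaces the single interleaved grouping loop with prev_y/current_row state by two differently-shaped passes: first compute the boundary indices where adjacent sorted blocks differ in y by >= 40, then build the rows by slicing the sorted list between consecutive boundaries.
import Mathlib
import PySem

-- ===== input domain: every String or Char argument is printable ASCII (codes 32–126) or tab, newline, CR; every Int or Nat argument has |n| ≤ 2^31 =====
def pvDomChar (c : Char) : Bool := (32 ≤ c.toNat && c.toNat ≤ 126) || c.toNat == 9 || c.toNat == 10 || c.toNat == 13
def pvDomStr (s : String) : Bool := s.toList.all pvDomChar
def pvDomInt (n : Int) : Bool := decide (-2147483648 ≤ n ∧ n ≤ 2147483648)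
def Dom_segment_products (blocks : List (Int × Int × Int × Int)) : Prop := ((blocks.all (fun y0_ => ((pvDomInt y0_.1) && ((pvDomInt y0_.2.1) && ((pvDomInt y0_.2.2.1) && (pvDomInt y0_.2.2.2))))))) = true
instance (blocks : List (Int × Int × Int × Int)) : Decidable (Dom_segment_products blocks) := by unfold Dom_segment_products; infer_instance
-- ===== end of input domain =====

-- B groups the blocks by computing boundary indices then slicing, instead of A's single
-- interleaved loop with prev_y/current_row state; return values are proved identical.

-- ===== PORT A =====
-- A's loop state: (rows, current_row, prev_y); finally append current_row if nonempty.
def segment_products (blocks : List (Int × Int × Int × Int)) : List (List (Int × Int × Int × Int)) :=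
  let s := PySem.List.sorted blocks (fun b => b.2.1) false
  let st := s.foldl
    (fun (st : List (List (Int × Int × Int × Int)) × List (Int × Int × Int × Int) × Option Int) b =>
      match st.2.2 with
      | none => (st.1, st.2.1 ++ [b], some b.2.1)
      | some p =>
        if |b.2.1 - p| < 40 then (st.1, st.2.1 ++ [b], some b.2.1)
        else (st.1 ++ [st.2.1], [b], some b.2.1))
    ([], [], none)
  if st.2.1.isEmpty then st.1 else st.1 ++ [st.2.1]

-- ===== PORT B =====
def segment_products_alt (blocks : List (Int × Int × Int × Int)) : List (List (Int × Int × Int × Int)) :=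
  let s := PySem.List.sorted blocks (fun b => b.2.1) false
  if s.isEmpty then []
  else
    let n : Int := s.length
    let breaks := (PySem.List.pyRange 1 n 1).filter
      (fun i => decide (40 ≤ |(PySem.List.pyGetD s i (0,0,0,0)).2.1 - (PySem.List.pyGetD s (i - 1) (0,0,0,0)).2.1|))
    let bounds : List Int := 0 :: breaks ++ [n]
    (bounds.zip bounds.tail).map (fun p => PySem.List.slice s (some p.1) (some p.2))

-- ===== PRECONDITION & SPEC =====
def Spec_segment_products (blocks : List (Int × Int × Int × Int)) (out : List (List (Int × Int × Int × Int))) : Prop := out = segment_products_alt blocks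
instance (blocks : List (Int × Int × Int × Int)) (out : List (List (Int × Int × Int × Int))) : Decidable (Spec_segment_products blocks out) := by unfold Spec_segment_products; infer_instance

-- ===== CLAIM (what is proved, stated in full; the proofs are below) =====
def Claim_equal_segment_products : Prop := ∀ (blocks : List (Int × Int × Int × Int)), Dom_segment_products blocks → Spec_segment_products blocks (segment_products blocks)

-- ===== LEMMAS AND PROOFS =====

-- The common reference: adjacent-grouping of a list (the rows both programs produce).
def chunkGo (cur : List (Int × Int × Int × Int)) (p : Int) :
    List (Int × Int × Int × Int) → List (List (Int × Int × Int × Int))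
  | [] => [cur]
  | b :: t => if |b.2.1 - p| < 40 then chunkGo (cur ++ [b]) b.2.1 t else cur :: chunkGo [b] b.2.1 t

def chunk : List (Int × Int × Int × Int) → List (List (Int × Int × Int × Int))
  | [] => []
  | b :: t => chunkGo [b] b.2.1 t

-- ---- A-side: the fold equals chunk ----

lemma foldA_eq_chunkGo (l : List (Int × Int × Int × Int)) :
    ∀ (rows : List (List (Int × Int × Int × Int))) (cur : List (Int × Int × Int × Int)) (p : Int),
    cur ≠ [] →
    (let st := l.foldl
        (fun (st : List (List (Int × Int × Int × Int)) × List (Int × Int × Int × Int) × Option Int) b =>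
          match st.2.2 with
          | none => (st.1, st.2.1 ++ [b], some b.2.1)
          | some q =>
            if |b.2.1 - q| < 40 then (st.1, st.2.1 ++ [b], some b.2.1)
            else (st.1 ++ [st.2.1], [b], some b.2.1))
        (rows, cur, some p)
      if st.2.1.isEmpty then st.1 else st.1 ++ [st.2.1]) = rows ++ chunkGo cur p l := by
  induction l with
  | nil =>
    intro rows cur p hcur
    simp [chunkGo, List.isEmpty_iff, hcur]
  | cons b t ih =>
    intro rows cur p hcur
    simp only [List.foldl_cons, chunkGo]
    by_cases h : |b.2.1 - p| < 40
    · simp only [h]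
      exact ih rows (cur ++ [b]) b.2.1 (by simp)
    · simp only [if_neg h]
      rw [ih (rows ++ [cur]) [b] b.2.1 (by simp)]
      simp

lemma segA_eq_chunk (s : List (Int × Int × Int × Int)) :
    (let st := s.foldl
        (fun (st : List (List (Int × Int × Int × Int)) × List (Int × Int × Int × Int) × Option Int) b =>
          match st.2.2 with
          | none => (st.1, st.2.1 ++ [b], some b.2.1)
          | some q =>
            if |b.2.1 - q| < 40 then (st.1, st.2.1 ++ [b], some b.2.1)
            else (st.1 ++ [st.2.1], [b], some b.2.1))
        ([], [], none)
      if st.2.1.isEmpty then st.1 else st.1 ++ [st.2.1]) = chunk s := by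
  cases s with
  | nil => simp [chunk]
  | cons b t =>
    simp only [List.foldl_cons, chunk]
    have := foldA_eq_chunkGo t [] [b] b.2.1 (by simp)
    simpa using this

-- ---- B-side: boundary indices then slices ----

-- break indices, at the Nat level
def breaksNat (s : List (Int × Int × Int × Int)) : List Nat :=
  (List.range (s.length - 1)).filter
    (fun k => decide (40 ≤ |(s.getD (k + 1) (0,0,0,0)).2.1 - (s.getD k (0,0,0,0)).2.1|))

-- slices of s between consecutive bounds, starting at a
def slicesFrom (s : List (Int × Int × Int × Int)) (a : Nat) :
    List Nat → List (List (Int × Int × Int × Int))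
  | [] => []
  | b :: bs => ((s.drop a).take (b - a)) :: slicesFrom s b bs

lemma zip_pairs_eq_slicesFrom (s : List (Int × Int × Int × Int)) :
    ∀ (bs : List Nat) (a : Nat),
    ((((a :: bs).map (fun x : Nat => (x : Int))).zip (bs.map (fun x : Nat => (x : Int)))).map
        (fun p => PySem.List.slice s (some p.1) (some p.2))) = slicesFrom s a bs := by
  intro bs
  induction bs with
  | nil => intro a; simp [slicesFrom]
  | cons b bs ih =>
    intro a
    simp only [List.map_cons, List.zip_cons_cons, List.map_cons, slicesFrom,
      PySem.List.slice_natCast]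
    exact congrArg _ (ih b)

lemma slicesFrom_shift (s : List (Int × Int × Int × Int)) (x : Int × Int × Int × Int) :
    ∀ (bs : List Nat) (a : Nat),
    slicesFrom (x :: s) (a + 1) (bs.map (· + 1)) = slicesFrom s a bs := by
  intro bs
  induction bs with
  | nil => intro a; simp [slicesFrom]
  | cons b bs ih => intro a; simp [slicesFrom, ih b]

lemma breaksNat_cons (a b : Int × Int × Int × Int) (t : List (Int × Int × Int × Int)) :
    breaksNat (a :: b :: t) =
      (if 40 ≤ |b.2.1 - a.2.1| then [0] else []) ++ (breaksNat (b :: t)).map (· + 1) := by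
  unfold breaksNat
  simp only [List.length_cons, Nat.add_sub_cancel, List.range_succ_eq_map,
    List.filter_cons, List.filter_map]
  by_cases h : 40 ≤ |b.2.1 - a.2.1|
  · simp [h, Function.comp_def, Nat.succ_eq_add_one]
    exact List.map_congr_left fun x _ => rfl
  · simp [h, Function.comp_def, Nat.succ_eq_add_one]
    exact List.map_congr_left fun x _ => rfl

lemma chunkGo_pre (l : List (Int × Int × Int × Int)) :
    ∀ (cur pre : List (Int × Int × Int × Int)) (p : Int),
    chunkGo (pre ++ cur) p l = (pre ++ (chunkGo cur p l).headI) :: (chunkGo cur p l).tail := by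
  induction l with
  | nil => intro cur pre p; simp [chunkGo]
  | cons b t ih =>
    intro cur pre p
    by_cases h : |b.2.1 - p| < 40
    · simp only [chunkGo, if_pos h]
      rw [List.append_assoc]
      exact ih (cur ++ [b]) pre b.2.1
    · simp [chunkGo, if_neg h]

lemma slicesFrom_eq_chunk (t : List (Int × Int × Int × Int)) :
    t ≠ [] → slicesFrom t 0 ((breaksNat t).map (· + 1) ++ [t.length]) = chunk t := by
  induction t with
  | nil => intro h; exact absurd rfl h
  | cons a t ih =>
    intro _
    cases t with
    | nil => simp [breaksNat, slicesFrom, chunk, chunkGo]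
    | cons b t' =>
      rw [breaksNat_cons]
      by_cases h : 40 ≤ |b.2.1 - a.2.1|
      · -- break right after a
        have hmap : ((if 40 ≤ |b.2.1 - a.2.1| then [0] else []) ++ (breaksNat (b :: t')).map (· + 1)).map (· + 1) ++ [(a :: b :: t').length]
            = 1 :: (((breaksNat (b :: t')).map (· + 1) ++ [(b :: t').length]).map (· + 1)) := by
          simp [h, Function.comp_def]
        rw [hmap]
        show ((a :: b :: t').take 1) :: slicesFrom (a :: b :: t') 1 _ = _
        have h1 : (1 : Nat) = 0 + 1 := rfl
        rw [h1, slicesFrom_shift, ih (by simp)]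
        have hnear : ¬ |b.2.1 - a.2.1| < 40 := by omega
        simp [chunk, chunkGo, if_neg hnear]
      · -- a and b in the same row
        have hmap : ((if 40 ≤ |b.2.1 - a.2.1| then [0] else []) ++ (breaksNat (b :: t')).map (· + 1)).map (· + 1) ++ [(a :: b :: t').length]
            = ((breaksNat (b :: t')).map (· + 1) ++ [(b :: t').length]).map (· + 1) := by
          simp [h, Function.comp_def]
        rw [hmap]
        have hbt : (breaksNat (b :: t')).map (· + 1) ++ [(b :: t').length] ≠ [] := by simp
        obtain ⟨c, cs, hcs⟩ := List.exists_cons_of_ne_nil hbt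
        rw [hcs]
        show ((a :: b :: t').take (c + 1)) :: slicesFrom (a :: b :: t') (c + 1) (cs.map (· + 1)) = _
        rw [slicesFrom_shift]
        have hih := ih (by simp)
        rw [hcs] at hih
        have hfirst : slicesFrom (b :: t') 0 (c :: cs) = ((b :: t').take c) :: slicesFrom (b :: t') c cs := by
          simp [slicesFrom]
        rw [hfirst] at hih
        have hnear : |b.2.1 - a.2.1| < 40 := by omega
        have hck : chunk (a :: b :: t') = (a :: (chunk (b :: t')).headI) :: (chunk (b :: t')).tail := by
          show chunkGo [a] a.2.1 (b :: t') = _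
          rw [show chunkGo [a] a.2.1 (b :: t') = chunkGo ([a] ++ [b]) b.2.1 t' by
            simp [chunkGo, if_pos hnear]]
          rw [chunkGo_pre]
          rfl
        rw [hck, ← hih]
        simp

-- normalize port B's Int-indexed body to the Nat-level slicesFrom form
lemma segB_eq_chunk (s : List (Int × Int × Int × Int)) :
    (if s.isEmpty then []
     else
       let n : Int := s.length
       let breaks := (PySem.List.pyRange 1 n 1).filter
         (fun i => decide (40 ≤ |(PySem.List.pyGetD s i (0,0,0,0)).2.1 - (PySem.List.pyGetD s (i - 1) (0,0,0,0)).2.1|))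
       let bounds : List Int := 0 :: breaks ++ [n]
       (bounds.zip bounds.tail).map (fun p => PySem.List.slice s (some p.1) (some p.2))) = chunk s := by
  by_cases hs : s = []
  · simp [hs, chunk]
  · simp only [List.isEmpty_iff, hs, ite_false]
    have hbr : (PySem.List.pyRange 1 (s.length : Int) 1).filter
        (fun i => decide (40 ≤ |(PySem.List.pyGetD s i (0,0,0,0)).2.1 - (PySem.List.pyGetD s (i - 1) (0,0,0,0)).2.1|))
        = (breaksNat s).map (fun k => ((k + 1 : Nat) : Int)) := by
      rw [PySem.List.pyRange_one, List.filter_map]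
      unfold breaksNat
      have hlen : (((s.length : Int)) - 1).toNat = s.length - 1 := by omega
      rw [hlen]
      have hfil : (List.range (s.length - 1)).filter
          ((fun i => decide (40 ≤ |(PySem.List.pyGetD s i (0,0,0,0)).2.1 - (PySem.List.pyGetD s (i - 1) (0,0,0,0)).2.1|)) ∘ fun k : Nat => (1 : Int) + k)
          = (List.range (s.length - 1)).filter
            (fun k => decide (40 ≤ |(s.getD (k + 1) (0,0,0,0)).2.1 - (s.getD k (0,0,0,0)).2.1|)) := by
        apply List.filter_congr
        intro k hk
        have hcast : (1 : Int) + (k : Int) = ((k + 1 : Nat) : Int) := by push_cast; ring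
        simp only [Function.comp_def, hcast, PySem.List.pyGetD_natCast]
        have hsub : ((k + 1 : Nat) : Int) - 1 = ((k : Nat) : Int) := by push_cast; ring
        rw [hsub, PySem.List.pyGetD_natCast]
      rw [hfil]
      have hf : (fun k : Nat => (1 : Int) + k) = (fun k : Nat => ((k + 1 : Nat) : Int)) := by
        funext k; push_cast; ring
      rw [hf]
    rw [hbr]
    have e1 : (0 : Int) :: (breaksNat s).map (fun k => ((k + 1 : Nat) : Int)) ++ [(s.length : Int)]
        = ((0 : Nat) :: ((breaksNat s).map (· + 1) ++ [s.length])).map (fun x : Nat => (x : Int)) := by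
      simp [List.map_map, Function.comp_def]
    rw [e1]
    have e2 : (((0 : Nat) :: ((breaksNat s).map (· + 1) ++ [s.length])).map (fun x : Nat => (x : Int))).tail
        = ((breaksNat s).map (· + 1) ++ [s.length]).map (fun x : Nat => (x : Int)) := by
      simp
    rw [e2, zip_pairs_eq_slicesFrom]
    exact slicesFrom_eq_chunk s hs

-- ===== VERDICT (by name: the statement is the Claim_ definition above) =====
theorem segment_products_spec : Claim_equal_segment_products := by
  intro blocks _
  show segment_products blocks = segment_products_alt blocks
  unfold segment_products segment_products_alt
  rw [segA_eq_chunk, segB_eq_chunk]
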